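-- pv_equiv track=rewrite | github.com/blueflotsam/Kattis-Solutions | python/veci.py | function
-- ===== SOURCE A (Python) =====
-- def function(array):
--     val = array[-1]
--     for i in range(-1, -len(array)-1, -1):
--         if val > array[i]:
--             return len(array) + i
--         else:
--             val = array[i]
--     return -1
-- ===== SOURCE B (Python) =====
-- def function(array):
--     result = -1
--     for i in range(len(array) - 1):
--         if array[i] < array[i + 1]:
--             result = i
--     return result
-- ===== Notes on version B (the rewrite author's own statement) =====
-- stated objective: simpler
-- what changed: Replaces A's backward scan with negative indices, a tracked previous value and an early return by a plain forward loop over adjacent pairs that keeps the last ascent index.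
import Mathlib
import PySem

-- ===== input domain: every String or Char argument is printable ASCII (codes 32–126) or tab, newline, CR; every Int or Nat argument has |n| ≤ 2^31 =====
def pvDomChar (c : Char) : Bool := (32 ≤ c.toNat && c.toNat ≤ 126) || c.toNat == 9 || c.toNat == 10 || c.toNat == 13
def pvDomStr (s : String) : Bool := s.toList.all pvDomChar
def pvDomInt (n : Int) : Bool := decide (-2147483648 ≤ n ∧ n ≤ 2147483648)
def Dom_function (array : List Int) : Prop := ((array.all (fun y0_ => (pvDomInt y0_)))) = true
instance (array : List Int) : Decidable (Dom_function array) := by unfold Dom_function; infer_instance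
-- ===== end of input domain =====

-- B replaces A's backward early-return scan (negative indices, tracked previous value)
-- by a plain forward fold keeping the last ascent index: simpler, same O(n) cost.


-- ===== PORT A =====
-- the for-loop with early return, as structural recursion over the index list
def functionGo (array : List Int) (val : Int) (is : List Int) : Int :=
  match is with
  | [] => -1
  | i :: rest =>
    match PySem.List.pyGet? array i with
    | none => 0  -- IndexError; never reached under Pre_function
    | some ai => if val > ai then (array.length : Int) + i else functionGo array ai rest

def function (array : List Int) : Int :=
  match PySem.List.pyGet? array (-1) with
  | none => 0  -- IndexError on the empty list; excluded by Pre_function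
  | some v => functionGo array v (PySem.List.pyRange (-1) (-(array.length : Int) - 1) (-1))

-- ===== PORT B =====
def function_alt (array : List Int) : Int :=
  (PySem.List.pyRange 0 ((array.length : Int) - 1) 1).foldl
    (fun result i =>
      if PySem.List.pyGetD array i 0 < PySem.List.pyGetD array (i + 1) 0 then i else result)
    (-1)

-- ===== PRECONDITION & SPEC =====
-- A evaluates array[-1] first, so it raises IndexError on the empty list.
def Pre_function (array : List Int) : Prop := array ≠ []
instance (array : List Int) : Decidable (Pre_function array) := by unfold Pre_function; infer_instance
def pvWitness_function : List Int := [3, 1, 2]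

def Spec_function (array : List Int) (out : Int) : Prop := out = function_alt array
instance (array : List Int) (out : Int) : Decidable (Spec_function array out) := by unfold Spec_function; infer_instance

-- ===== CLAIM (what is proved, stated in full; the proofs are below) =====
def Claim_equal_function : Prop := ∀ (array : List Int), Dom_function array → Pre_function array → Spec_function array (function array)

-- ===== LEMMAS AND PROOFS =====

-- common reference: first ascent index scanning k-1, k-2, …, 0; -1 if none
def findDesc (a : List Int) : Nat → Int
  | 0 => -1
  | k + 1 => if a.getD k 0 < a.getD (k + 1) 0 then (k : Int) else findDesc a k

theorem alt_fold_eq_findDesc (a : List Int) (m : Nat) :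
    (PySem.List.pyRange 0 (m : Int) 1).foldl
      (fun result i =>
        if PySem.List.pyGetD a i 0 < PySem.List.pyGetD a (i + 1) 0 then i else result)
      (-1) = findDesc a m := by
  induction m with
  | zero => simp [findDesc]
  | succ k ih =>
    have h : ((k : Int) + 1) = ((k + 1 : Nat) : Int) := by push_cast; ring
    rw [show ((k + 1 : Nat) : Int) = (k : Int) + 1 by push_cast; ring,
        PySem.List.pyRange_one_succ_right (by positivity : (0:Int) ≤ (k:Int)),
        List.foldl_append, ih]
    simp only [List.foldl, findDesc, PySem.List.pyGetD_natCast, h, PySem.List.pyGetD_natCast]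

theorem go_eq_findDesc (a : List Int) (k : Nat) (hk : k ≤ a.length) :
    functionGo a (a.getD k 0) (PySem.List.pyRange (-(a.length : Int) + k - 1) (-(a.length : Int) - 1) (-1))
      = findDesc a k := by
  induction k with
  | zero =>
    rw [PySem.List.pyRange_neg_one_eq_nil (by omega)]
    simp [functionGo, findDesc]
  | succ k ih =>
    rw [PySem.List.pyRange_neg_one_cons (by omega)]
    have hget : PySem.List.pyGet? a (-(a.length : Int) + (k + 1 : Nat) - 1) = some (a.getD k 0) := by
      have h1 : (-(a.length : Int) + (k + 1 : Nat) - 1) = -(((a.length - k : Nat)) : Int) := by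
        push_cast [Nat.cast_sub (by omega : k ≤ a.length)]; ring
      rw [h1, PySem.List.pyGet?_neg_natCast a (a.length - k) (by omega) (by omega),
          show a.length - (a.length - k) = k from by omega,
          List.getElem?_eq_getElem (by omega), List.getD_eq_getElem _ _ (by omega)]
    simp only [functionGo, hget]
    by_cases hlt : a.getD k 0 < a.getD (k + 1) 0
    · rw [if_pos hlt]
      simp only [findDesc, if_pos hlt]
      push_cast
      ring
    · rw [if_neg hlt]
      have harg : (-(a.length : Int) + (k + 1 : Nat) - 1 - 1) = -(a.length : Int) + k - 1 := by
        push_cast; ring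
      rw [harg, ih (by omega)]
      simp only [findDesc, if_neg hlt]

theorem function_eq_findDesc (a : List Int) (h : a ≠ []) :
    function a = findDesc a (a.length - 1) := by
  have hlen : 0 < a.length := List.length_pos_iff.mpr h
  have hget : PySem.List.pyGet? a (-1) = some (a.getD (a.length - 1) 0) := by
    have h := PySem.List.pyGet?_neg_natCast a 1 (by omega) (by omega)
    rw [show (-((1 : Nat) : Int)) = (-1 : Int) by norm_num] at h
    rw [h, List.getElem?_eq_getElem (by omega), List.getD_eq_getElem _ _ (by omega)]
  simp only [function, hget]
  rw [PySem.List.pyRange_neg_one_cons (by omega : -(a.length : Int) - 1 < -1)]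
  simp only [functionGo, hget, lt_irrefl, if_false]
  have harg : (-1 - 1 : Int) = -(a.length : Int) + (a.length - 1 : Nat) - 1 := by
    push_cast [Nat.cast_sub (by omega : 1 ≤ a.length)]; ring
  rw [harg, go_eq_findDesc a (a.length - 1) (by omega)]


-- ===== VERDICT (by name: the statement is the Claim_ definition above) =====
theorem function_spec : Claim_equal_function := by
  intro array _ hpre
  have hlen : 0 < array.length := List.length_pos_iff.mpr hpre
  unfold Spec_function function_alt
  rw [function_eq_findDesc array hpre,
      show ((array.length : Int) - 1) = ((array.length - 1 : Nat) : Int) by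
        push_cast [Nat.cast_sub (by omega : 1 ≤ array.length)]; ring,
      alt_fold_eq_findDesc]
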